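-- pv_equiv track=rewrite | github.com/krstevkoki/vestacka-inteligencija | aud3/molecule_problem.py | leftAtomH1
-- ===== SOURCE A (Python) =====
-- def leftAtomH1(state):
--     H1_i, H1_j, O_i, O_j, H2_i, H2_j = state
--     while 0 <= H1_i <= 6 and 0 <= H1_j <= 8 and \
--             (H1_i, H1_j) not in Prepreki and \
--             (H1_i, H1_j) not in ((O_i, O_j), (H2_i, H2_j)):
--         H1_j -= 1
--         state = (H1_i, H1_j, O_i, O_j, H2_i, H2_j)
--
--     return state[0], state[1] + 1
--
-- Prepreki = [
--     (5, 0), (3, 1), (5, 1), (1, 2), (0, 3), (5, 3), (4, 4),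
--     (0, 5), (3, 6), (4, 6), (5, 6), (0, 7), (3, 7), (1, 8)
-- ]
-- ===== SOURCE B (Python) =====
-- Prepreki = [
--     (5, 0), (3, 1), (5, 1), (1, 2), (0, 3), (5, 3), (4, 4),
--     (0, 5), (3, 6), (4, 6), (5, 6), (0, 7), (3, 7), (1, 8)
-- ]
--
--
-- def leftAtomH1(state):
--     H1_i, H1_j, O_i, O_j, H2_i, H2_j = state
--     if not (0 <= H1_i <= 6) or not (0 <= H1_j <= 8):
--         return H1_i, H1_j + 1
--     blocked = [j for (i, j) in Prepreki if i == H1_i]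
--     if O_i == H1_i:
--         blocked.append(O_j)
--     if H2_i == H1_i:
--         blocked.append(H2_j)
--     stop = max((c for c in blocked if 0 <= c <= H1_j), default=-1)
--     return H1_i, stop + 1
-- ===== Notes on version B (the rewrite author's own statement) =====
-- stated objective: alternative
-- what changed: Replaces the column-by-column while-loop simulation with building the list of blocked columns in the start row (obstacles plus O and H2 when on that row) and computing the stopping column as one max-reduction over the blocked columns <= the start column, with -1 as left-boundary sentinel.
import Mathlib
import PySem

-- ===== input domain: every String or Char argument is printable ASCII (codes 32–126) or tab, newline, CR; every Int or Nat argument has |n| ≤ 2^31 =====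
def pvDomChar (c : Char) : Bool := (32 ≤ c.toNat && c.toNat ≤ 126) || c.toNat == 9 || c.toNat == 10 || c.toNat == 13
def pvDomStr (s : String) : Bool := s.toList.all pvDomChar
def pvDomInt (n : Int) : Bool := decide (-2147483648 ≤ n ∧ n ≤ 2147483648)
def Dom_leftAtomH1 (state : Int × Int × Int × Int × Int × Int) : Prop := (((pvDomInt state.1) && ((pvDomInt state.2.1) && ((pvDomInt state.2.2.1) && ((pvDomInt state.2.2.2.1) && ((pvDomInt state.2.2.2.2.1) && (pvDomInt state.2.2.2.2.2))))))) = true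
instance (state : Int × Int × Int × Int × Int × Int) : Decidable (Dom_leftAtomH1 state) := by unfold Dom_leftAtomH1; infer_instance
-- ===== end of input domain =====

-- B replaces A's column-by-column while-loop simulation by indexing the blocked
-- columns of the start row and taking one max-reduction (objective: simpler decomposition).

-- ===== PORT A =====
def PreprekiL : List (Int × Int) :=
  [(5, 0), (3, 1), (5, 1), (1, 2), (0, 3), (5, 3), (4, 4),
   (0, 5), (3, 6), (4, 6), (5, 6), (0, 7), (3, 7), (1, 8)]

-- the while loop of A: returns the final value of H1_j
def leftAtomH1Loop (i j oi oj hi hj : Int) : Int :=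
  if h : 0 ≤ i ∧ i ≤ 6 ∧ 0 ≤ j ∧ j ≤ 8 ∧ (i, j) ∉ PreprekiL ∧ (i, j) ≠ (oi, oj) ∧ (i, j) ≠ (hi, hj) then
    leftAtomH1Loop i (j - 1) oi oj hi hj
  else j
termination_by (j + 1).toNat
decreasing_by
  have := h.2.2.1
  omega

def leftAtomH1 (state : Int × Int × Int × Int × Int × Int) : Int × Int :=
  match state with
  | (i, j, oi, oj, hi, hj) => (i, leftAtomH1Loop i j oi oj hi hj + 1)

-- ===== PORT B =====
-- the blocked columns of row i
def blockedCols (i oi oj hi hj : Int) : List Int :=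
  let base := (PreprekiL.filter (fun p => p.1 == i)).map Prod.snd
  let base := if oi == i then base ++ [oj] else base
  if hi == i then base ++ [hj] else base

def leftAtomH1_alt (state : Int × Int × Int × Int × Int × Int) : Int × Int :=
  match state with
  | (i, j, oi, oj, hi, hj) =>
    if ¬(0 ≤ i ∧ i ≤ 6) ∨ ¬(0 ≤ j ∧ j ≤ 8) then (i, j + 1)
    else
      let stop := ((blockedCols i oi oj hi hj).filter
        (fun c => decide (0 ≤ c ∧ c ≤ j))).foldl max (-1)
      (i, stop + 1)

-- ===== PRECONDITION & SPEC =====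
def Spec_leftAtomH1 (state : Int × Int × Int × Int × Int × Int) (out : Int × Int) : Prop := out = leftAtomH1_alt state
instance (state : Int × Int × Int × Int × Int × Int) (out : Int × Int) : Decidable (Spec_leftAtomH1 state out) := by unfold Spec_leftAtomH1; infer_instance

-- ===== CLAIM (what is proved, stated in full; the proofs are below) =====
def Claim_equal_leftAtomH1 : Prop := ∀ (state : Int × Int × Int × Int × Int × Int), Dom_leftAtomH1 state → Spec_leftAtomH1 state (leftAtomH1 state)

-- ===== LEMMAS AND PROOFS =====

theorem le_foldl_max (l : List Int) (a : Int) : a ≤ l.foldl max a := by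
  induction l generalizing a with
  | nil => simp
  | cons x xs ih => exact le_trans (le_max_left a x) (ih (max a x))

theorem mem_le_foldl_max (l : List Int) (a x : Int) (hx : x ∈ l) : x ≤ l.foldl max a := by
  induction l generalizing a with
  | nil => simp at hx
  | cons y ys ih =>
    rcases List.mem_cons.mp hx with h | h
    · subst h; exact le_trans (le_max_right a x) (le_foldl_max ys (max a x))
    · exact ih (max a y) h

theorem foldl_max_le (l : List Int) (a b : Int) (ha : a ≤ b) (h : ∀ x ∈ l, x ≤ b) :
    l.foldl max a ≤ b := by
  induction l generalizing a with
  | nil => simpa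
  | cons x xs ih =>
    exact ih (max a x) (max_le ha (h x (by simp))) (fun y hy => h y (by simp [hy]))

theorem mem_prepCols (i c : Int) :
    c ∈ (PreprekiL.filter (fun p => p.1 == i)).map Prod.snd ↔ (i, c) ∈ PreprekiL := by
  simp only [List.mem_map, List.mem_filter, beq_iff_eq]
  constructor
  · rintro ⟨⟨a, b⟩, ⟨hp, rfl⟩, rfl⟩; exact hp
  · intro h; exact ⟨(i, c), ⟨h, rfl⟩, rfl⟩

theorem mem_blockedCols (i oi oj hi hj c : Int) :
    c ∈ blockedCols i oi oj hi hj ↔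
      (i, c) ∈ PreprekiL ∨ (oi = i ∧ oj = c) ∨ (hi = i ∧ hj = c) := by
  unfold blockedCols
  by_cases h1 : oi = i <;> by_cases h2 : hi = i <;>
    simp [h1, h2, List.mem_append, mem_prepCols] <;>
    constructor <;> intro h <;>
    · rcases h with h | h | h <;> simp_all

-- B's stopping column
def stopCol (i oi oj hi hj j : Int) : Int :=
  ((blockedCols i oi oj hi hj).filter (fun c => decide (0 ≤ c ∧ c ≤ j))).foldl max (-1)

theorem loop_eq_stop (i oi oj hi hj : Int) :
    ∀ (n : ℕ) (j : Int), (j + 1).toNat = n → 0 ≤ j → j ≤ 8 → 0 ≤ i → i ≤ 6 →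
      leftAtomH1Loop i j oi oj hi hj = stopCol i oi oj hi hj j := by
  intro n
  induction n using Nat.strong_induction_on with
  | _ n ih =>
    intro j hn hj0 hj8 hi0 hi6
    by_cases hb : (i, j) ∉ PreprekiL ∧ (i, j) ≠ (oi, oj) ∧ (i, j) ≠ (hi, hj)
    · -- not blocked at j: loop steps to j-1
      have hstep : leftAtomH1Loop i j oi oj hi hj = leftAtomH1Loop i (j - 1) oi oj hi hj := by
        rw [leftAtomH1Loop]
        simp [hi0, hi6, hj0, hj8, hb.1, hb.2.1, hb.2.2]
      have hjnot : j ∉ blockedCols i oi oj hi hj := by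
        rw [mem_blockedCols]
        rintro (h | ⟨h1, h2⟩ | ⟨h1, h2⟩)
        · exact hb.1 h
        · exact hb.2.1 (by simp [h1, h2])
        · exact hb.2.2 (by simp [h1, h2])
      have hfil : (blockedCols i oi oj hi hj).filter (fun c => decide (0 ≤ c ∧ c ≤ j))
          = (blockedCols i oi oj hi hj).filter (fun c => decide (0 ≤ c ∧ c ≤ j - 1)) := by
        apply List.filter_congr
        intro c hc
        have hne : c ≠ j := fun h => hjnot (h ▸ hc)
        simp only [decide_eq_decide]
        omega
      by_cases h0 : j = 0
      · -- next step leaves the grid: loop returns -1, and no blocked column ≤ -1 exists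
        subst h0
        have : leftAtomH1Loop i (-1 : Int) oi oj hi hj = -1 := by
          rw [leftAtomH1Loop]; simp
        rw [hstep]
        norm_num at this ⊢
        rw [this]
        unfold stopCol
        have : (blockedCols i oi oj hi hj).filter (fun c => decide (0 ≤ c ∧ c ≤ 0)) = [] := by
          rw [List.filter_eq_nil_iff]
          intro c hc
          have hne : c ≠ 0 := fun h => hjnot (h ▸ hc)
          simp only [decide_eq_true_eq]
          omega
        rw [this]; rfl
      · have hrec := ih (j - 1 + 1).toNat (by omega) (j - 1) rfl (by omega) (by omega) hi0 hi6
        rw [hstep, hrec]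
        unfold stopCol
        rw [hfil]
    · -- blocked at j: loop returns j, and j is the maximal blocked column ≤ j
      have hret : leftAtomH1Loop i j oi oj hi hj = j := by
        rw [leftAtomH1Loop]
        have : ¬(0 ≤ i ∧ i ≤ 6 ∧ 0 ≤ j ∧ j ≤ 8 ∧ (i, j) ∉ PreprekiL ∧
            (i, j) ≠ (oi, oj) ∧ (i, j) ≠ (hi, hj)) := by tauto
        simp only [this, dite_false]
      have hjmem : j ∈ blockedCols i oi oj hi hj := by
        rw [mem_blockedCols]
        by_cases hP : (i, j) ∈ PreprekiL
        · exact Or.inl hP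
        · by_cases hO : (i, j) = (oi, oj)
          · obtain ⟨h1', h2'⟩ := Prod.ext_iff.mp hO
            exact Or.inr (Or.inl ⟨h1'.symm, h2'.symm⟩)
          · have hH : (i, j) = (hi, hj) := by tauto
            obtain ⟨h1', h2'⟩ := Prod.ext_iff.mp hH
            exact Or.inr (Or.inr ⟨h1'.symm, h2'.symm⟩)
      unfold stopCol
      have hjfil : j ∈ (blockedCols i oi oj hi hj).filter (fun c => decide (0 ≤ c ∧ c ≤ j)) := by
        rw [List.mem_filter]
        exact ⟨hjmem, by simp; omega⟩
      rw [hret]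
      apply le_antisymm
      · exact mem_le_foldl_max _ _ _ hjfil
      · apply foldl_max_le _ _ _ (by omega)
        intro x hx
        rw [List.mem_filter] at hx
        have := hx.2
        simp only [decide_eq_true_eq] at this
        omega

-- ===== VERDICT (by name: the statement is the Claim_ definition above) =====
theorem leftAtomH1_spec : Claim_equal_leftAtomH1 := by
  intro state _
  obtain ⟨i, j, oi, oj, hi, hj⟩ := state
  unfold Spec_leftAtomH1 leftAtomH1 leftAtomH1_alt
  by_cases hvalid : ¬(0 ≤ i ∧ i ≤ 6) ∨ ¬(0 ≤ j ∧ j ≤ 8)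
  · -- invalid row or column: the loop condition fails immediately
    simp only [hvalid, if_true]
    have : leftAtomH1Loop i j oi oj hi hj = j := by
      rw [leftAtomH1Loop]
      have : ¬(0 ≤ i ∧ i ≤ 6 ∧ 0 ≤ j ∧ j ≤ 8 ∧ (i, j) ∉ PreprekiL ∧
          (i, j) ≠ (oi, oj) ∧ (i, j) ≠ (hi, hj)) := by tauto
      simp only [this, dite_false]
    rw [this]
  · have h1 : 0 ≤ i ∧ i ≤ 6 := by tauto
    have h2 : 0 ≤ j ∧ j ≤ 8 := by tauto
    simp only [hvalid, if_false]
    have := loop_eq_stop i oi oj hi hj (j + 1).toNat j rfl h2.1 h2.2 h1.1 h1.2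
    unfold stopCol at this
    rw [this]
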